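-- pv_equiv track=rewrite | github.com/Duy-Thong/I_learn_python | CodePTIT/Onthi/PYKT071.py | find_non_decreasing_numbers
-- ===== SOURCE A (Python) =====
-- def find_non_decreasing_numbers(data1, data2):
--     result = []
--     count_data1 = {}
--     count_data2 = {}
--
--     for num in data1:
--         count_data1[num] = count_data1.get(num, 0) + 1
--
--     for num in data2:
--         count_data2[num] = count_data2.get(num, 0) + 1
--
--     common_numbers = set(data1) & set(data2)
--
--     for num in sorted(common_numbers):
--         result.append((num, count_data1.get(num, 0), count_data2.get(num, 0)))
--
--     return result
-- ===== SOURCE B (Python) =====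
-- from itertools import groupby
--
--
-- def _runs(data):
--     # collapse a sorted copy into consecutive (value, run_length) runs
--     return [(v, sum(1 for _ in g)) for v, g in groupby(sorted(data))]
--
--
-- def find_non_decreasing_numbers(data1, data2):
--     r1 = _runs(data1)
--     r2 = _runs(data2)
--     out = []
--     i = j = 0
--     while i < len(r1) and j < len(r2):
--         v1, c1 = r1[i]
--         v2, c2 = r2[j]
--         if v1 < v2:
--             i += 1
--         elif v2 < v1:
--             j += 1
--         else:
--             out.append((v1, c1, c2))
--             i += 1
--             j += 1
--     return out
-- ===== Notes on version B (the rewrite author's own statement) =====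
-- stated objective: alternative
-- what changed: Replaces A's two counting dicts plus set-intersection plus final sort by run-length-encoding sorted copies of each list and a two-pointer sort-merge join over the run lists, whose output is already in ascending order.
import Mathlib
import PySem

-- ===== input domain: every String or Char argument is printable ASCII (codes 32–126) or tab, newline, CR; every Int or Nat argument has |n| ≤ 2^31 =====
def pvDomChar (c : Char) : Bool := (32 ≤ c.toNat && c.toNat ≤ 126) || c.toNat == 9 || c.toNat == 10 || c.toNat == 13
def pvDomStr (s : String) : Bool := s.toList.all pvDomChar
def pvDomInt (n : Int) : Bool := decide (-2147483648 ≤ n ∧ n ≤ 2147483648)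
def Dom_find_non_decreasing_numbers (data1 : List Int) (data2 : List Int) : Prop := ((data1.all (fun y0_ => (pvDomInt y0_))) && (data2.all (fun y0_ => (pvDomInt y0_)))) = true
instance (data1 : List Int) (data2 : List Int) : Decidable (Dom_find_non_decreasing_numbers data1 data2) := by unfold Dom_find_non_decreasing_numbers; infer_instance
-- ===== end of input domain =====

-- B replaces A's two counting dicts + set intersection + final sort by a sort-merge join
-- over run-length-encoded sorted copies; objective: alternative algorithm, same result.

-- ===== PORT A =====
def find_non_decreasing_numbers (data1 : List Int) (data2 : List Int) : List (Int × Int × Int) :=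
  -- result = []; count_data1 = {}; count_data2 = {}
  -- for num in data1: count_data1[num] = count_data1.get(num, 0) + 1
  let count_data1 : PySem.Dict Int Int :=
    data1.foldl (fun d num => d.modify num 0 (· + 1)) PySem.Dict.empty
  -- for num in data2: count_data2[num] = count_data2.get(num, 0) + 1
  let count_data2 : PySem.Dict Int Int :=
    data2.foldl (fun d num => d.modify num 0 (· + 1)) PySem.Dict.empty
  -- common_numbers = set(data1) & set(data2)
  let common_numbers : PySem.Set Int :=
    PySem.Set.inter (PySem.Set.ofList data1) (PySem.Set.ofList data2)
  -- for num in sorted(common_numbers): result.append((num, get(num,0), get(num,0)))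
  (PySem.List.sorted common_numbers (fun x => x)).foldl
    (fun result num => result ++ [(num, count_data1.getD num 0, count_data2.getD num 0)]) []

-- ===== PORT B =====
-- _runs on the sorted copy: [(v, len(list(g))) for v, g in groupby(sorted(data))]
def pvRuns : List Int → List (Int × Int)
  | [] => []
  | x :: xs =>
    (x, (1 + (xs.takeWhile (· == x)).length : Int)) :: pvRuns (xs.dropWhile (· == x))
termination_by ys => ys.length
decreasing_by
  have := List.length_dropWhile_le (fun y => y == x) xs
  simpa using Nat.lt_succ_of_le this

-- the two-pointer walk over the two run lists
def pvMerge : List (Int × Int) → List (Int × Int) → List (Int × Int × Int)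
  | [], _ => []
  | _ :: _, [] => []
  | (v1, c1) :: r1, (v2, c2) :: r2 =>
    if v1 < v2 then pvMerge r1 ((v2, c2) :: r2)
    else if v2 < v1 then pvMerge ((v1, c1) :: r1) r2
    else (v1, c1, c2) :: pvMerge r1 r2
termination_by l1 l2 => l1.length + l2.length

def find_non_decreasing_numbers_alt (data1 : List Int) (data2 : List Int) : List (Int × Int × Int) :=
  pvMerge (pvRuns (PySem.List.sorted data1 (fun x => x)))
          (pvRuns (PySem.List.sorted data2 (fun x => x)))

-- ===== PRECONDITION & SPEC =====
def Spec_find_non_decreasing_numbers (data1 : List Int) (data2 : List Int) (out : List (Int × Int × Int)) : Prop := out = find_non_decreasing_numbers_alt data1 data2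
instance (data1 : List Int) (data2 : List Int) (out : List (Int × Int × Int)) : Decidable (Spec_find_non_decreasing_numbers data1 data2 out) := by unfold Spec_find_non_decreasing_numbers; infer_instance

-- ===== CLAIM (what is proved, stated in full; the proofs are below) =====
def Claim_equal_find_non_decreasing_numbers : Prop := ∀ (data1 : List Int) (data2 : List Int), Dom_find_non_decreasing_numbers data1 data2 → Spec_find_non_decreasing_numbers data1 data2 (find_non_decreasing_numbers data1 data2)

-- ===== LEMMAS AND PROOFS =====

def pvRKeys (ys : List Int) : List Int := (pvRuns ys).map Prod.fst

theorem pvRKeys_nil : pvRKeys [] = [] := by simp [pvRKeys, pvRuns]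

theorem pvRKeys_cons (x : Int) (xs : List Int) :
    pvRKeys (x :: xs) = x :: pvRKeys (xs.dropWhile (· == x)) := by
  simp [pvRKeys, pvRuns]

theorem pv_drop_gt (x : Int) (xs : List Int) (h : (x :: xs).Pairwise (· ≤ ·)) :
    ∀ v ∈ xs.dropWhile (· == x), x < v := by
  induction xs with
  | nil => simp
  | cons y ys ih =>
    by_cases hy : (y == x) = true
    · rw [List.dropWhile_cons, if_pos hy]
      exact ih (h.sublist (List.Sublist.cons₂ x (List.sublist_cons_self y ys)))
    · rw [List.dropWhile_cons, if_neg hy]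
      intro v hv
      have hxy : x ≤ y := List.rel_of_pairwise_cons h (by simp)
      have hne : y ≠ x := by simpa using hy
      have hxy' : x < y := lt_of_le_of_ne hxy (Ne.symm hne)
      rcases List.mem_cons.mp hv with rfl | hv'
      · exact hxy'
      · exact lt_of_lt_of_le hxy' (List.rel_of_pairwise_cons h.of_cons hv')

theorem pvRKeys_subset (ys : List Int) : ∀ v ∈ pvRKeys ys, v ∈ ys := by
  induction ys using pvRuns.induct with
  | case1 => simp [pvRKeys_nil]
  | case2 x xs ih =>
    rw [pvRKeys_cons]
    intro v hv
    rcases List.mem_cons.mp hv with rfl | hv'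
    · simp
    · exact List.mem_cons_of_mem x ((List.dropWhile_sublist _).subset (ih v hv'))

theorem pvRKeys_pairwise (ys : List Int) (h : ys.Pairwise (· ≤ ·)) :
    (pvRKeys ys).Pairwise (· < ·) := by
  induction ys using pvRuns.induct with
  | case1 => simp [pvRKeys_nil]
  | case2 x xs ih =>
    rw [pvRKeys_cons]
    refine List.Pairwise.cons ?_ (ih (h.of_cons.sublist (List.dropWhile_sublist _)))
    intro v hv
    exact pv_drop_gt x xs h v (pvRKeys_subset _ v hv)

theorem pvRKeys_mem (ys : List Int) (h : ys.Pairwise (· ≤ ·)) (v : Int) :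
    v ∈ pvRKeys ys ↔ v ∈ ys := by
  constructor
  · exact pvRKeys_subset ys v
  · revert h
    induction ys using pvRuns.induct with
    | case1 => simp
    | case2 x xs ih =>
      intro h hv
      rw [pvRKeys_cons]
      rcases List.mem_cons.mp hv with rfl | hv'
      · simp
      · by_cases hvx : v = x
        · simp [hvx]
        · refine List.mem_cons_of_mem x ?_
          apply ih (h.of_cons.sublist (List.dropWhile_sublist _))
          have hsplit := List.takeWhile_append_dropWhile (p := (· == x)) (l := xs)
          rcases List.mem_append.mp (by rw [hsplit]; exact hv') with ht | hd
          · exact absurd (by simpa using List.mem_takeWhile_imp ht) hvx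
          · exact hd

theorem pvRuns_eq (ys : List Int) (h : ys.Pairwise (· ≤ ·)) :
    pvRuns ys = (pvRKeys ys).map (fun v => (v, (ys.count v : Int))) := by
  revert h
  induction ys using pvRuns.induct with
  | case1 => intro _; simp [pvRKeys_nil, pvRuns]
  | case2 x xs ih =>
    intro h
    rw [pvRKeys_cons, List.map_cons]
    have hsplit := List.takeWhile_append_dropWhile (p := (· == x)) (l := xs)
    have hgt := pv_drop_gt x xs h
    have hxd : x ∉ xs.dropWhile (· == x) := fun hx => absurd (hgt x hx) (lt_irrefl x)
    have hcx : ((x :: xs).count x : Int) = 1 + ((xs.takeWhile (· == x)).length : Int) := by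
      have h1 : (xs.count x) = (xs.takeWhile (· == x)).count x + (xs.dropWhile (· == x)).count x := by
        conv_lhs => rw [← hsplit]
        exact List.count_append ..
      have h2 : (xs.takeWhile (· == x)).count x = (xs.takeWhile (· == x)).length := by
        apply List.count_eq_length.mpr
        intro b hb
        have hb' : b = x := by simpa using List.mem_takeWhile_imp hb
        simp [hb']
      have h3 : (xs.dropWhile (· == x)).count x = 0 := List.count_eq_zero.mpr hxd
      rw [List.count_cons_self, h1, h2, h3]
      push_cast; ring
    rw [pvRuns, ih (h.of_cons.sublist (List.dropWhile_sublist _))]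
    refine congrArg₂ _ (by rw [hcx]) ?_
    apply List.map_congr_left
    intro v hv
    have hvd : v ∈ xs.dropWhile (· == x) := pvRKeys_subset _ v hv
    have hvx : x < v := hgt v hvd
    have hvt : (xs.takeWhile (· == x)).count v = 0 := by
      apply List.count_eq_zero.mpr
      intro hm
      exact absurd (by simpa using List.mem_takeWhile_imp hm) (ne_of_gt hvx)
    have : (x :: xs).count v = (xs.dropWhile (· == x)).count v := by
      rw [List.count_cons_of_ne (ne_of_gt hvx).symm]
      conv_lhs => rw [← hsplit]
      rw [List.count_append, hvt]
      omega
    rw [this]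

theorem pvMerge_eq (l1 : List Int) (f1 : Int → Int) (h1 : l1.Pairwise (· < ·)) :
    ∀ (l2 : List Int) (f2 : Int → Int), l2.Pairwise (· < ·) →
    pvMerge (l1.map (fun v => (v, f1 v))) (l2.map (fun v => (v, f2 v))) =
      (l1.filter (fun v => decide (v ∈ l2))).map (fun v => (v, f1 v, f2 v)) := by
  induction l1 with
  | nil => intro l2 f2 _; cases l2 <;> simp [pvMerge]
  | cons v1 t1 ih =>
    intro l2 f2
    induction l2 with
    | nil => intro _; simp [pvMerge]
    | cons v2 t2 ih2 =>
      intro h2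
      simp only [List.map_cons]
      rw [pvMerge]
      by_cases hlt : v1 < v2
      · rw [if_pos hlt]
        have hnmem : v1 ∉ v2 :: t2 := by
          intro hm
          rcases List.mem_cons.mp hm with rfl | hm'
          · exact lt_irrefl v1 hlt
          · exact absurd (lt_trans hlt (List.rel_of_pairwise_cons h2 hm')) (lt_irrefl v1)
        rw [List.filter_cons_of_neg (by simpa using hnmem)]
        simpa using ih h1.of_cons (v2 :: t2) f2 h2
      · by_cases hgt : v2 < v1
        · rw [if_neg hlt, if_pos hgt]
          have hfc : List.filter (fun v => decide (v ∈ v2 :: t2)) (v1 :: t1)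
              = List.filter (fun v => decide (v ∈ t2)) (v1 :: t1) := by
            refine List.filter_congr ?_
            intro v hv
            have hv1 : v1 ≤ v := by
              rcases List.mem_cons.mp hv with rfl | hv'
              · exact le_refl v
              · exact le_of_lt (List.rel_of_pairwise_cons h1 hv')
            have : v ≠ v2 := fun hvv => absurd (lt_of_lt_of_le hgt hv1) (by rw [hvv]; exact lt_irrefl v2)
            simp [List.mem_cons, this]
          rw [hfc]
          simpa using ih2 h2.of_cons
        · have heq : v1 = v2 := le_antisymm (not_lt.mp hgt) (not_lt.mp hlt)
          subst heq
          rw [if_neg hlt, if_neg hgt]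
          rw [List.filter_cons_of_pos (by simp)]
          rw [List.map_cons]
          refine congrArg _ ?_
          rw [ih h1.of_cons t2 f2 h2.of_cons]
          refine congrArg _ (List.filter_congr ?_)
          intro v hv
          have : v ≠ v1 := fun hvv => absurd (List.rel_of_pairwise_cons h1 hv) (by rw [hvv]; exact lt_irrefl v1)
          simp [List.mem_cons, this]

theorem pv_flatMap_single {A B : Type} (g : A → B) (l : List A) :
    l.flatMap (fun x => [g x]) = l.map g := by
  induction l with
  | nil => rfl
  | cons a t ih => simp [List.flatMap_cons, ih]

theorem pv_common_eq (d1 d2 : List Int) :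
    PySem.List.sorted (PySem.Set.inter (PySem.Set.ofList d1) (PySem.Set.ofList d2)) (fun x => x)
      = (pvRKeys (PySem.List.sorted d1 (fun x => x))).filter
          (fun v => decide (v ∈ pvRKeys (PySem.List.sorted d2 (fun x => x)))) := by
  have hs1 := PySem.List.sorted_pairwise d1 (fun x => x)
  have hs2 := PySem.List.sorted_pairwise d2 (fun x => x)
  have hk1 := pvRKeys_pairwise _ hs1
  apply PySem.List.sorted_eq_of_perm_of_pairwise_lt
  · rw [List.perm_ext_iff_of_nodup]
    · intro a
      rw [List.mem_filter]
      simp only [decide_eq_true_eq]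
      rw [pvRKeys_mem _ hs1, pvRKeys_mem _ hs2,
        PySem.List.mem_sorted, PySem.List.mem_sorted,
        PySem.Set.mem_inter, PySem.Set.mem_ofList, PySem.Set.mem_ofList]
    · exact ((List.Pairwise.sublist List.filter_sublist hk1).imp ne_of_lt : List.Nodup _)
    · exact PySem.Set.nodup_inter _ _ (PySem.Set.nodup_ofList d1)
  · exact List.Pairwise.sublist List.filter_sublist hk1

-- ===== VERDICT (by name: the statement is the Claim_ definition above) =====
theorem find_non_decreasing_numbers_spec : Claim_equal_find_non_decreasing_numbers := by
  unfold Claim_equal_find_non_decreasing_numbers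
  intro d1 d2 _
  unfold Spec_find_non_decreasing_numbers find_non_decreasing_numbers find_non_decreasing_numbers_alt
  rw [← PySem.Dict.counter_eq_foldl, ← PySem.Dict.counter_eq_foldl,
    PySem.List.foldl_append_eq_flatMap, List.nil_append, pv_flatMap_single]
  simp only [PySem.Dict.getD_counter]
  have hs1 := PySem.List.sorted_pairwise d1 (fun x => x)
  have hs2 := PySem.List.sorted_pairwise d2 (fun x => x)
  rw [pvRuns_eq _ hs1, pvRuns_eq _ hs2]
  rw [pvMerge_eq _ _ (pvRKeys_pairwise _ hs1) _ _ (pvRKeys_pairwise _ hs2)]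
  rw [pv_common_eq d1 d2]
  apply List.map_congr_left
  intro v _
  rw [(PySem.List.sorted_perm d1 (fun x => x) false).count_eq,
    (PySem.List.sorted_perm d2 (fun x => x) false).count_eq]
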